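-- pv_equiv track=rewrite | github.com/hmx222/JScanner2 | FileIO/db_manager.py | _is_static_resource
-- ===== SOURCE A (Python) =====
-- def _is_static_resource(url: str) -> bool:
--     """判断是否为静态资源文件"""
--     static_extensions = [
--         ".js", ".vue", ".css", ".ts", ".jsx", ".tsx",
--         ".png", ".jpg", ".jpeg", ".gif", ".svg", ".ico", ".webp",
--         ".woff", ".woff2", ".ttf", ".eot",
--         ".mp4", ".mp3", ".wav", ".webm"
--     ]
--     url_lower = url.lower()
--     url_without_query = url_lower.split("?")[0]
--
--     for ext in static_extensions:
--         if url_without_query.endswith(ext):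
--             return True
--
--     return False
-- ===== SOURCE B (Python) =====
-- STATIC_EXTENSIONS = frozenset({
--     ".js", ".vue", ".css", ".ts", ".jsx", ".tsx",
--     ".png", ".jpg", ".jpeg", ".gif", ".svg", ".ico", ".webp",
--     ".woff", ".woff2", ".ttf", ".eot",
--     ".mp4", ".mp3", ".wav", ".webm"
-- })
--
--
-- def _is_static_resource(url: str) -> bool:
--     """判断是否为静态资源文件"""
--     path = url.lower().split("?")[0]
--     _head, sep, ext = path.rpartition(".")
--     return sep == "." and ("." + ext) in STATIC_EXTENSIONS
-- ===== Notes on version B (the rewrite author's own statement) =====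
-- stated objective: idiomatic
-- what changed: A's loop trying endswith for each of 21 extensions is replaced by extracting the suffix after the last dot once (rpartition) and testing a single membership in a frozenset of extensions.
import Mathlib
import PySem

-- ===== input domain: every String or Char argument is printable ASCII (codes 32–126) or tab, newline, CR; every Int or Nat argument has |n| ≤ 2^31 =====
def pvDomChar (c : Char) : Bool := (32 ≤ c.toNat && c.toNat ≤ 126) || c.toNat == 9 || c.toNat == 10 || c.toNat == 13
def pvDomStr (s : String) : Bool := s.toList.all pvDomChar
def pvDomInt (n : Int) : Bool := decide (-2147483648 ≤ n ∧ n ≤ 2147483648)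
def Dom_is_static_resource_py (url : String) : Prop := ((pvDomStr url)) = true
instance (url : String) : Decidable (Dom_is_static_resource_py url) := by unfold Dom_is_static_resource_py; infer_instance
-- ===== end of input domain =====

-- B replaces A's 21-way endswith loop by extracting the suffix after the last '.' once
-- (rpartition) and doing a single set-membership test (idiomatic; same return value).

-- ===== PORT A =====
def is_static_resource_py (url : String) : Bool :=
  let static_extensions : List String :=
    [".js", ".vue", ".css", ".ts", ".jsx", ".tsx",
     ".png", ".jpg", ".jpeg", ".gif", ".svg", ".ico", ".webp",
     ".woff", ".woff2", ".ttf", ".eot",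
     ".mp4", ".mp3", ".wav", ".webm"]
  let url_lower := PySem.Str.lower url
  -- url_lower.split("?")[0]: split? is some for a non-empty separator and its result is
  -- never empty, so getD/headD never take their defaults
  let url_without_query := ((PySem.Str.split? url_lower "?").getD []).headD ""
  -- the for/endswith/early-return loop
  static_extensions.any (fun ext => PySem.Str.endswith url_without_query ext)

-- ===== PORT B =====
-- B's frozenset constant, elements as character lists
def staticExtSetB : PySem.Set (List Char) :=
  PySem.Set.ofList
    [".js".toList, ".vue".toList, ".css".toList, ".ts".toList, ".jsx".toList, ".tsx".toList,
     ".png".toList, ".jpg".toList, ".jpeg".toList, ".gif".toList, ".svg".toList, ".ico".toList, ".webp".toList,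
     ".woff".toList, ".woff2".toList, ".ttf".toList, ".eot".toList,
     ".mp4".toList, ".mp3".toList, ".wav".toList, ".webm".toList]

def is_static_resource_py_alt (url : String) : Bool :=
  let path := ((PySem.Str.split? (PySem.Str.lower url) "?").getD []).headD ""
  -- hand port of `_head, sep, ext = path.rpartition(".")` (exact: sep == "." iff '.' occurs
  -- in path, and then ext is the run of non-'.' characters at the end, i.e. the reversed
  -- longest dot-free prefix of the reversed path)
  let r := path.toList.reverse
  if '.' ∈ r then
    let ext := (r.takeWhile (fun c => c ≠ '.')).reverse
    -- `"." + ext in STATIC_EXTENSIONS`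
    decide (('.' :: ext) ∈ staticExtSetB)
  else
    false

-- ===== PRECONDITION & SPEC =====
def Spec_is_static_resource_py (url : String) (out : Bool) : Prop := out = is_static_resource_py_alt url
instance (url : String) (out : Bool) : Decidable (Spec_is_static_resource_py url out) := by unfold Spec_is_static_resource_py; infer_instance

-- ===== CLAIM (what is proved, stated in full; the proofs are below) =====
def Claim_equal_is_static_resource_py : Prop := ∀ (url : String), Dom_is_static_resource_py url → Spec_is_static_resource_py url (is_static_resource_py url)

-- ===== LEMMAS AND PROOFS =====

-- A's extension list, named for the proofs (definitionally the list inside port A).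
def pvExtsA : List String :=
  [".js", ".vue", ".css", ".ts", ".jsx", ".tsx",
   ".png", ".jpg", ".jpeg", ".gif", ".svg", ".ico", ".webp",
   ".woff", ".woff2", ".ttf", ".eot",
   ".mp4", ".mp3", ".wav", ".webm"]

-- every extension is '.' followed by a dot-free body
lemma pvExtsA_shape : ∀ e ∈ pvExtsA, ∃ w, e.toList = '.' :: w ∧ '.' ∉ w := by
  have h : ∀ e ∈ pvExtsA, e.toList.head? = some '.' ∧ '.' ∉ e.toList.tail := by decide
  intro e he
  obtain ⟨h1, h2⟩ := h e he
  cases hcs : e.toList with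
  | nil => rw [hcs] at h1; simp at h1
  | cons c t =>
    rw [hcs] at h1 h2
    simp only [List.head?_cons, Option.some.injEq] at h1
    exact ⟨t, by rw [h1], by simpa using h2⟩

-- B's set is exactly A's list, element-wise toList (ofList dedups nothing here)
lemma staticExtSetB_eq : staticExtSetB = pvExtsA.map String.toList := by decide

-- key lemma: for a dot-free v, "v ++ ['.'] is a prefix of r" says exactly that r contains a
-- '.' and the maximal dot-free prefix of r is v
lemma prefix_dot_iff (v : List Char) (hv : '.' ∉ v) (r : List Char) :
    v ++ ['.'] <+: r ↔ ('.' ∈ r ∧ r.takeWhile (fun c => c ≠ '.') = v) := by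
  induction r generalizing v with
  | nil => simp
  | cons c r ih =>
    cases v with
    | nil =>
      simp only [List.nil_append, List.takeWhile_cons]
      constructor
      · intro hp
        have hc : '.' = c := (List.cons_prefix_cons.mp hp).1
        subst hc
        exact ⟨by simp, by simp⟩
      · rintro ⟨hm, htw⟩
        by_cases hc : c = '.'
        · subst hc
          exact List.cons_prefix_cons.mpr ⟨rfl, List.nil_prefix⟩
        · rw [if_pos (by simp [hc])] at htw
          simp at htw
    | cons d v' =>
      have hd : d ≠ '.' := fun h => hv (h ▸ List.mem_cons_self ..)
      have hv' : '.' ∉ v' := fun h => hv (List.mem_cons_of_mem _ h)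
      by_cases hc : c = '.'
      · subst hc
        constructor
        · intro hp
          exact absurd (List.cons_prefix_cons.mp hp).1 hd
        · rintro ⟨-, htw⟩
          rw [List.takeWhile_cons, if_neg (by simp)] at htw
          simp at htw
      · rw [List.cons_append, List.cons_prefix_cons, List.takeWhile_cons,
            if_pos (by simp [hc])]
        constructor
        · rintro ⟨rfl, hp⟩
          have hk := (ih v' hv').mp hp
          exact ⟨List.mem_cons_of_mem _ hk.1, by rw [hk.2]⟩
        · rintro ⟨hm, heq⟩
          obtain ⟨rfl, htw⟩ := List.cons_eq_cons.mp heq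
          have hm' : '.' ∈ r := by
            rcases List.mem_cons.mp hm with h | h
            · exact absurd h.symm hc
            · exact h
          exact ⟨rfl, (ih v' hv').mpr ⟨hm', htw⟩⟩

-- core: A's endswith loop over the extensions equals B's last-dot extraction + set lookup,
-- for any character list cs
lemma pvCore (cs : List Char) :
    (pvExtsA.any fun ext => PySem.Chars.endswith cs ext.toList) =
    (if '.' ∈ cs.reverse then
       decide (('.' :: ((cs.reverse.takeWhile (fun c => c ≠ '.')).reverse)) ∈ staticExtSetB)
     else false) := by
  rw [staticExtSetB_eq]
  by_cases hd : '.' ∈ cs.reverse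
  · rw [if_pos hd]
    apply Bool.eq_iff_iff.mpr
    simp only [List.any_eq_true, decide_eq_true_eq, List.mem_map]
    constructor
    · rintro ⟨e, he, hend⟩
      obtain ⟨w, hw, hwdot⟩ := pvExtsA_shape e he
      rw [PySem.Chars.endswith_iff, hw] at hend
      have hpre : w.reverse ++ ['.'] <+: cs.reverse := by
        simpa using List.reverse_prefix.mpr hend
      have hkey := (prefix_dot_iff w.reverse (by simpa using hwdot) cs.reverse).mp hpre
      exact ⟨e, he, by rw [hw, hkey.2]; simp⟩
    · rintro ⟨e, he, htl⟩
      obtain ⟨w, hw, hwdot⟩ := pvExtsA_shape e he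
      have h3 : w = (cs.reverse.takeWhile (fun c => c ≠ '.')).reverse :=
        (List.cons_eq_cons.mp (hw.symm.trans htl)).2
      have hww : cs.reverse.takeWhile (fun c => c ≠ '.') = w.reverse := by
        rw [h3]; simp
      refine ⟨e, he, ?_⟩
      rw [PySem.Chars.endswith_iff, hw]
      have hk := (prefix_dot_iff w.reverse (by simpa using hwdot) cs.reverse).mpr ⟨hd, hww⟩
      refine List.reverse_prefix.mp ?_
      simpa using hk
  · rw [if_neg hd]
    refine List.any_eq_false.mpr ?_
    intro e he
    obtain ⟨w, hw, -⟩ := pvExtsA_shape e he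
    intro h
    rw [PySem.Chars.endswith_iff, hw] at h
    exact hd (by simpa using h.mem (by simp : '.' ∈ '.' :: w))

-- ===== VERDICT (by name: the statement is the Claim_ definition above) =====
theorem is_static_resource_py_spec : Claim_equal_is_static_resource_py := by
  intro url _
  unfold Spec_is_static_resource_py
  show is_static_resource_py url = is_static_resource_py_alt url
  unfold is_static_resource_py is_static_resource_py_alt
  simp only [PySem.Str.endswith_eq]
  exact pvCore (((PySem.Str.split? (PySem.Str.lower url) "?").getD []).headD "").toList
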